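-- pv_equiv track=rewrite | github.com/Iancu15/IC | lab2/ex3.py | split_in_cosets
-- ===== SOURCE A (Python) =====
-- def split_in_cosets(text, keylen):
--     """ Splits a text in keylen cosets. """
--     cosets = []
--     for i in range(keylen):
--         coset = []
--         for j in range(i, len(text), keylen):
--             coset.append(text[j])
--         cosets.append(coset)
--     return cosets
-- ===== SOURCE B (Python) =====
-- def split_in_cosets(text, keylen):
--     """ Splits a text in keylen cosets. """
--     if keylen <= 0:
--         return []
--     groups = {}
--     for idx, ch in enumerate(text):
--         groups.setdefault(idx % keylen, []).append(ch)
--     return [groups.get(i, []) for i in range(keylen)]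
-- ===== Notes on version B (the rewrite author's own statement) =====
-- stated objective: alternative
-- what changed: Replaces A's nested loops (outer over coset index, inner striding through the text) by a single enumerate pass that groups each character into a dict keyed by index % keylen, then reads the groups out in order.
import Mathlib
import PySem

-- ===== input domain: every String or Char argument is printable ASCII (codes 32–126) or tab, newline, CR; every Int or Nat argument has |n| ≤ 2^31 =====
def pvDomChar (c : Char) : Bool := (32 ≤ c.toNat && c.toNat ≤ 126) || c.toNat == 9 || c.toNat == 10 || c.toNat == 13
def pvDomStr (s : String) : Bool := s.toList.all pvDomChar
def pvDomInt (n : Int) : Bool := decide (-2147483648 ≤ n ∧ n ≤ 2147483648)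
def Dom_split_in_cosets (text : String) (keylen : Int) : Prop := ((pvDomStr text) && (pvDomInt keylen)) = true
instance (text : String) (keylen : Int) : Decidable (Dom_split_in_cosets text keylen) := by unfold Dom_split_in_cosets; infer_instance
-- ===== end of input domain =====

-- B replaces A's nested stride loops by one enumerate pass grouping characters by index mod keylen into a dict (alternative decomposition, same cost).


-- ===== PORT A =====
-- text[j] (always in range here: 0 ≤ i ≤ j < len(text)) is ported with pyGetD; Python's 1-char string becomes String.ofList [·].
def split_in_cosets (text : String) (keylen : Int) : List (List String) :=
  (PySem.List.pyRange 0 keylen 1).foldl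
    (fun cosets i =>
      cosets ++ [(PySem.List.pyRange i (PySem.Str.len text) keylen).foldl
        (fun coset j => coset ++ [String.ofList [PySem.List.pyGetD text.toList j ' ']]) []]) []

-- ===== PORT B =====
-- groups.setdefault(idx % keylen, []).append(ch) is Dict.modify key [] (· ++ [ch]).
def split_in_cosets_alt (text : String) (keylen : Int) : List (List String) :=
  if keylen ≤ 0 then []
  else
    let groups : PySem.Dict Int (List String) :=
      (PySem.List.enumerate text.toList).foldl
        (fun d p => d.modify (PySem.Int.mod p.1 keylen) [] (fun c => c ++ [String.ofList [p.2]]))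
        PySem.Dict.empty
    (PySem.List.pyRange 0 keylen 1).map (fun i => groups.getD i [])

-- ===== PRECONDITION & SPEC =====
def Spec_split_in_cosets (text : String) (keylen : Int) (out : List (List String)) : Prop := out = split_in_cosets_alt text keylen
instance (text : String) (keylen : Int) (out : List (List String)) : Decidable (Spec_split_in_cosets text keylen out) := by unfold Spec_split_in_cosets; infer_instance

-- ===== CLAIM (what is proved, stated in full; the proofs are below) =====
def Claim_equal_split_in_cosets : Prop := ∀ (text : String) (keylen : Int), Dom_split_in_cosets text keylen → Spec_split_in_cosets text keylen (split_in_cosets text keylen)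

-- ===== LEMMAS AND PROOFS =====

-- the stride range [i, i+k, …) below n is exactly the filter of [0, n) by (· % k = i), for 0 ≤ i < k
lemma stride_eq_filter (i n k : Int) (hk : 0 < k) (hi0 : 0 ≤ i) (hik : i < k) :
    PySem.List.pyRange i n k
      = (PySem.List.pyRange 0 n 1).filter (fun j => PySem.Int.mod j k == i) := by
  have hpl : List.Pairwise (fun a b => a < b) (PySem.List.pyRange i n k) := by
    rw [PySem.List.pyRange_of_pos i n hk]
    exact List.pairwise_lt_range.map _ (fun a b h => by
      have : (a : Int) < (b : Int) := by exact_mod_cast h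
      nlinarith)
  have hpr : List.Pairwise (fun a b => a < b) ((PySem.List.pyRange 0 n 1).filter (fun j => PySem.Int.mod j k == i)) :=
    List.Pairwise.sublist List.filter_sublist (PySem.List.pairwise_lt_pyRange_one 0 n)
  have hmem : ∀ x : Int, x ∈ PySem.List.pyRange i n k ↔
      x ∈ (PySem.List.pyRange 0 n 1).filter (fun j => PySem.Int.mod j k == i) := by
    intro x
    rw [PySem.List.mem_pyRange_iff_of_pos hk, List.mem_filter, PySem.List.mem_pyRange_one,
      beq_iff_eq, PySem.Int.mod_eq_emod_of_pos hk]
    constructor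
    · rintro ⟨hix, hxn, m, hm⟩
      have hx : x = i + k * m := by omega
      refine ⟨⟨by omega, hxn⟩, ?_⟩
      rw [hx, Int.add_mul_emod_self_left, Int.emod_eq_of_lt hi0 hik]
    · rintro ⟨⟨hx0, hxn⟩, hmod⟩
      have hdvd : k ∣ x - i := by
        refine ⟨x / k, ?_⟩
        have := Int.emod_def x k
        omega
      refine ⟨?_, hxn, hdvd⟩
      by_cases hxk : x < k
      · have := Int.emod_eq_of_lt hx0 hxk
        omega
      · have h1 := Int.emod_nonneg x (ne_of_gt hk)
        omega
  exact ((List.perm_ext_iff_of_nodup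
      (hpl.imp fun h => ne_of_lt h) (hpr.imp fun h => ne_of_lt h)).mpr hmem).eq_of_pairwise
    (fun a b _ _ h h' => absurd h' (lt_asymm h)) hpl hpr

-- each group read back from the dict is the filtered map of positions
lemma groups_getD (l : List Char) (k i : Int) :
    ((PySem.List.enumerate l).foldl
        (fun d p => d.modify (PySem.Int.mod p.1 k) [] (fun c => c ++ [String.ofList [p.2]]))
        (PySem.Dict.empty : PySem.Dict Int (List String))).getD i []
      = ((PySem.List.pyRange 0 (PySem.List.len l) 1).filter (fun j => PySem.Int.mod j k == i)).map
          (fun j => String.ofList [PySem.List.pyGetD l j ' ']) := by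
  rw [PySem.List.enumerate_eq_map_pyRange l ' ', List.foldl_map]
  have h := PySem.Dict.getD_foldl_modify_append
    ((PySem.List.pyRange 0 (PySem.List.len l) 1).map
      (fun j => (PySem.Int.mod j k, String.ofList [PySem.List.pyGetD l j ' '])))
    (PySem.Dict.empty : PySem.Dict Int (List String)) i
  rw [List.foldl_map, List.filter_map] at h
  simpa using h

-- ===== VERDICT (by name: the statement is the Claim_ definition above) =====
theorem split_in_cosets_spec : Claim_equal_split_in_cosets := by
  intro text keylen _
  unfold Spec_split_in_cosets split_in_cosets split_in_cosets_alt
  by_cases hk : keylen ≤ 0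
  · simp [hk, PySem.List.pyRange_one_eq_nil hk]
  · push Not at hk
    simp only [if_neg (not_le.mpr hk)]
    rw [PySem.List.foldl_append_singleton_eq_map
      (fun i => (PySem.List.pyRange i (PySem.Str.len text) keylen).foldl
        (fun coset j => coset ++ [String.ofList [PySem.List.pyGetD text.toList j ' ']]) [])]
    simp only [List.nil_append]
    apply List.map_congr_left
    intro i hi
    rw [PySem.List.mem_pyRange_one] at hi
    rw [groups_getD text.toList keylen i,
        ← stride_eq_filter i (PySem.List.len text.toList) keylen hk hi.1 hi.2,
        PySem.List.foldl_append_singleton_eq_map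
          (fun j => String.ofList [PySem.List.pyGetD text.toList j ' '])]
    simp [PySem.Str.len_eq]
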